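-- pv_equiv track=rewrite | github.com/ednaldo17/app_teste_ga | soma_flask/utils/bibliotecaswm.py | separar_cadeias_vetores
-- ===== SOURCE A (Python) =====
-- def separar_cadeias_vetores(cadeia): #Este código separa uma cadeia em tantos vetores (ainda em cadeias) contidos na cadeia original
-- #A cadeia: '(1,2), (3,2), (2,4)' sera vista como as a lista  ['(1,2)' '(3,2)'  e '(2,4)'].
--     lista_auxiliar, lista_vetores_separados = [], []
--     inicio_do_vetor,final_do_vetor,numero_vetores=0,0,0
--     cadeia_auxiliar='' #Esta cadeia vazia ira armazenar os elementos da lista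
--     for i in range(len(cadeia)):
--         if cadeia[i]!=')':
--             final_do_vetor+=1 #O contador final tera por valor o número de elementos do início da cadeia até o elemento anterior a ')'
--         else:
--             for j in range(inicio_do_vetor, inicio_do_vetor+final_do_vetor+1): #Neste for a cadeia armazena o primeiro vetor para transforma-lo em cadeia
--                 cadeia_auxiliar+=cadeia[j]
--             lista_auxiliar.append(cadeia_auxiliar) #adicionamos o primeiro vetor como elemento da lista v
--             numero_vetores+=1 #Este contador aumenta cada vez que um elemento é colocado na lista v, ou seja conta o número
--             inicio_do_vetor=inicio_do_vetor+final_do_vetor+1 #o contador iniciará no elemento após '('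
--             final_do_vetor=0 #contador final reinicia
--             cadeia_auxiliar='' #A cadeia reinicia
--     for i in range(numero_vetores):
--         if i==0:
--             lista_vetores_separados.append(lista_auxiliar[0]) #A cadeia zero inicia em '(' e finaliza em ')'
--         else:
--             lista_vetores_separados.append(lista_auxiliar[i][1::]) #Estas cadeias contém uma ',' antes do vetor então aqui retiramos essa ','
--     return lista_vetores_separados
-- ===== SOURCE B (Python) =====
-- def separar_cadeias_vetores(cadeia):
--     partes = cadeia.split(')')[:-1]
--     segmentos = [p + ')' for p in partes]
--     return segmentos[:1] + [s[1:] for s in segmentos[1:]]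
-- ===== Notes on version B (the rewrite author's own statement) =====
-- stated objective: simpler
-- what changed: A's hand-rolled scan with inicio/final index counters, an inner character-copying loop and a second index loop is replaced by str.split on the closing parenthesis with the last piece dropped, the separator re-appended and the first character stripped from every piece after the first.
import Mathlib
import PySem

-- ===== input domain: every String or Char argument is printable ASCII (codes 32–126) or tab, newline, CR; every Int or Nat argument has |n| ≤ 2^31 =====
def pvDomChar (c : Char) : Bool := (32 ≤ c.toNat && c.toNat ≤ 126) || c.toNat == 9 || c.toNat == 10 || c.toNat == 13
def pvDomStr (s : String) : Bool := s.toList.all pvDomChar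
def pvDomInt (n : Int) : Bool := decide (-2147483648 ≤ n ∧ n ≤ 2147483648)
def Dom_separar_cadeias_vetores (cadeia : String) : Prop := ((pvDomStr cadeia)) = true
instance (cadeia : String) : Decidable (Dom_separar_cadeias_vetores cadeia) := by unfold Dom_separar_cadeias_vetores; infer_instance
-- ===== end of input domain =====

-- B replaces A's index-counter scan with str.split(')') plus first-char stripping of the later pieces (simpler, same linear cost).

-- ===== PORT A =====
-- one step of A's first loop; state = (lista_auxiliar, inicio_do_vetor, final_do_vetor, cadeia_auxiliar, numero_vetores)
-- cadeia[i]/cadeia[j] is read with List.getD: every index A uses is provably in range, so this is exact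
def pvStepA (s : List Char) (st : List (List Char) × Nat × Nat × List Char × Nat) (i : Nat) :
    List (List Char) × Nat × Nat × List Char × Nat :=
  let (aux, inicio, final, cad, numero) := st
  if s.getD i ' ' ≠ ')' then
    (aux, inicio, final + 1, cad, numero)
  else
    let cad2 := (List.range' inicio (final + 1)).foldl (fun c j => c ++ [s.getD j ' ']) cad
    (aux ++ [cad2], inicio + final + 1, 0, [], numero + 1)

def separar_cadeias_vetores (cadeia : String) : List String :=
  let s := cadeia.toList
  let r := (List.range s.length).foldl (pvStepA s) ([], 0, 0, [], 0)
  let aux := r.1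
  let numero := r.2.2.2.2
  (List.range numero).foldl
    (fun out i =>
      if i = 0 then out ++ [String.mk (aux.getD 0 [])]
      else out ++ [String.mk (PySem.List.slice (aux.getD i []) (some 1) none)]) []

-- ===== PORT B =====
def separar_cadeias_vetores_alt (cadeia : String) : List String :=
  let partes := PySem.List.slice (PySem.Chars.splitOn cadeia.toList [')']) none (some (-1))
  let segmentos := partes.map (fun p => p ++ [')'])
  (PySem.List.slice segmentos none (some 1)).map String.mk
    ++ (PySem.List.slice segmentos (some 1) none).map (fun seg => String.mk (PySem.List.slice seg (some 1) none))

-- ===== PRECONDITION & SPEC =====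
def Spec_separar_cadeias_vetores (cadeia : String) (out : List String) : Prop := out = separar_cadeias_vetores_alt cadeia
instance (cadeia : String) (out : List String) : Decidable (Spec_separar_cadeias_vetores cadeia out) := by unfold Spec_separar_cadeias_vetores; infer_instance

-- ===== CLAIM (what is proved, stated in full; the proofs are below) =====
def Claim_equal_separar_cadeias_vetores : Prop := ∀ (cadeia : String), Dom_separar_cadeias_vetores cadeia → Spec_separar_cadeias_vetores cadeia (separar_cadeias_vetores cadeia)

-- ===== LEMMAS AND PROOFS =====

-- the list of ')'-terminated segments of `t`, `pre` being the chars already read since the last ')'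
def pvSegs (pre : List Char) : List Char → List (List Char)
  | [] => []
  | c :: t => if c = ')' then (pre ++ [')']) :: pvSegs [] t else pvSegs (pre ++ [c]) t

-- the pieces str.split(')') produces, same accumulator discipline
def pvParts (pre : List Char) : List Char → List (List Char)
  | [] => [pre]
  | c :: t => if c = ')' then pre :: pvParts [] t else pvParts (pre ++ [c]) t

lemma pvParts_ne_nil (pre t : List Char) : pvParts pre t ≠ [] := by
  induction t generalizing pre with
  | nil => simp [pvParts]
  | cons c t ih => by_cases h : c = ')' <;> simp [pvParts, h, ih]

lemma pvSplitOn_go_eq : ∀ (fuel : Nat) (t cur : List Char) (acc : List (List Char)),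
    t.length < fuel →
    PySem.Chars.splitOn.go [')'] fuel t cur acc = acc.reverse ++ pvParts cur.reverse t := by
  intro fuel
  induction fuel with
  | zero => intro t cur acc h; omega
  | succ f ih =>
      intro t cur acc h
      match t with
      | [] => simp [PySem.Chars.splitOn.go, pvParts]
      | c :: rest =>
          rw [PySem.Chars.splitOn.go]
          by_cases hc : c = ')'
          · have hp : List.isPrefixOf [')'] (c :: rest) = true := by simp [List.isPrefixOf, hc]
            rw [if_pos hp]
            simp only [List.length_cons] at h
            rw [ih _ _ _ (by simpa using h)]
            simp [pvParts, hc]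
          · have hp : List.isPrefixOf [')'] (c :: rest) = false := by
              simp [List.isPrefixOf]; exact fun e => hc e.symm
            rw [if_neg (by simp [hp])]
            simp only [List.length_cons] at h
            rw [ih _ _ _ (by omega)]
            simp [pvParts, hc]

lemma pvSplitOn_eq (s : List Char) : PySem.Chars.splitOn s [')'] = pvParts [] s := by
  have := pvSplitOn_go_eq (s.length + 1) s [] [] (by omega)
  simpa [PySem.Chars.splitOn] using this

lemma pvParts_dropLast (pre t : List Char) :
    (pvParts pre t).dropLast.map (fun p => p ++ [')']) = pvSegs pre t := by
  induction t generalizing pre with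
  | nil => simp [pvParts, pvSegs]
  | cons c t ih =>
      by_cases h : c = ')'
      · have hne := pvParts_ne_nil ([] : List Char) t
        simp [pvParts, pvSegs, h, List.dropLast_cons_of_ne_nil hne, ih]
      · simp [pvParts, pvSegs, h, ih]

lemma pvGet_of_drop (s t : List Char) (a : Nat) (c : Char)
    (hc : s.drop a = c :: t) (ha : a < s.length) : s[a] = c := by
  have h0 : (s.drop a)[0]'(by simp; omega) = c := by simp [hc]
  simpa using h0

lemma pvInnerMap (s : List Char) : ∀ (m i : Nat), i + m ≤ s.length →
    (List.range' i m).map (fun j => s.getD j ' ') = (s.drop i).take m := by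
  intro m
  induction m with
  | zero => simp
  | succ m ih =>
      intro i hi
      have hilt : i < s.length := by omega
      have h1 : (List.range' i (m+1)) = i :: List.range' (i+1) m := by
        simp [List.range'_succ]
      have h2 : s.getD i ' ' = s[i] := by
        simp [List.getD_eq_getElem?_getD, List.getElem?_eq_getElem hilt]
      have h3 : (s.drop i).take (m + 1) = s[i] :: ((s.drop (i+1)).take m) := by
        rw [List.drop_eq_getElem_cons hilt, List.take_succ_cons]
      rw [h1, List.map_cons, h2, ih (i+1) (by omega), h3]

lemma pvInnerLoop (s : List Char) (m i : Nat) (h : i + m ≤ s.length) :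
    (List.range' i m).foldl (fun c j => c ++ [s.getD j ' ']) [] = (s.drop i).take m := by
  rw [PySem.List.foldl_append_singleton_eq_map (f := fun j => s.getD j ' ')]
  simpa using pvInnerMap s m i h

lemma pvTake_succ_of_get (s : List Char) (inicio a : Nat) (c : Char)
    (hia : inicio ≤ a) (ha : a < s.length) (hc : s[a] = c) :
    (s.drop inicio).take (a - inicio + 1) = (s.drop inicio).take (a - inicio) ++ [c] := by
  rw [List.take_succ]
  have h : (s.drop inicio)[a - inicio]? = some c := by
    rw [List.getElem?_drop]
    have he : inicio + (a - inicio) = a := by omega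
    rw [he, List.getElem?_eq_getElem ha, hc]
  simp [h]

lemma pvLoopA (s : List Char) : ∀ (t : List Char) (a inicio : Nat) (aux : List (List Char)),
    inicio ≤ a → s.drop a = t → a ≤ s.length →
    ∃ fi ff,
      (List.range' a t.length).foldl (pvStepA s) (aux, inicio, a - inicio, [], aux.length)
        = (aux ++ pvSegs ((s.drop inicio).take (a - inicio)) t, fi, ff, ([] : List Char),
           aux.length + (pvSegs ((s.drop inicio).take (a - inicio)) t).length) := by
  intro t
  induction t with
  | nil => intro a inicio aux hia _ _; exact ⟨inicio, a - inicio, by simp [pvSegs]⟩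
  | cons c t ih =>
      intro a inicio aux hia hdrop ha
      have hlt : a < s.length := by
        have := congrArg List.length hdrop; simp at this; omega
      have hdrop' : s.drop (a + 1) = t := by
        have h2 := congrArg (List.drop 1) hdrop
        rw [List.drop_drop] at h2
        simpa [Nat.add_comm] using h2
      have hget : s[a] = c := pvGet_of_drop s t a c hdrop hlt
      have hget? : s[a]? = some c := by
        rw [List.getElem?_eq_getElem hlt, hget]
      rw [List.length_cons, List.range'_succ, List.foldl_cons]
      by_cases hc : c = ')'
      · have hstep : pvStepA s (aux, inicio, a - inicio, [], aux.length) a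
            = (aux ++ [(s.drop inicio).take (a - inicio) ++ [')']], a + 1, 0, [], aux.length + 1) := by
          simp only [pvStepA]
          rw [if_neg (by simp [List.getD_eq_getElem?_getD, hget?, hc])]
          rw [pvInnerLoop s (a - inicio + 1) inicio (by omega)]
          rw [pvTake_succ_of_get s inicio a c hia hlt hget, hc]
          have h5 : inicio + (a - inicio) + 1 = a + 1 := by omega
          rw [h5]
        rw [hstep]
        have h0 : (a + 1) - (a + 1) = 0 := by omega
        obtain ⟨fi, ff, hrec⟩ := ih (a + 1) (a + 1) (aux ++ [(s.drop inicio).take (a - inicio) ++ [')']])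
          (le_refl _) hdrop' (by omega)
        rw [h0] at hrec
        simp only [List.take_zero] at hrec
        have hlen : (aux ++ [(s.drop inicio).take (a - inicio) ++ [')']]).length = aux.length + 1 := by
          simp
        rw [hlen] at hrec
        refine ⟨fi, ff, ?_⟩
        rw [hrec]
        have hsegs : pvSegs ((s.drop inicio).take (a - inicio)) (c :: t)
            = ((s.drop inicio).take (a - inicio) ++ [')']) :: pvSegs [] t := by
          simp [pvSegs, hc]
        rw [hsegs]
        simp [List.append_assoc]
        omega
      · have hstep : pvStepA s (aux, inicio, a - inicio, [], aux.length) a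
            = (aux, inicio, (a + 1) - inicio, [], aux.length) := by
          simp only [pvStepA]
          rw [if_pos (by simp [List.getD_eq_getElem?_getD, hget?, hc])]
          have h5 : a - inicio + 1 = (a + 1) - inicio := by omega
          rw [h5]
        rw [hstep]
        obtain ⟨fi, ff, hrec⟩ := ih (a + 1) inicio aux (by omega) hdrop' (by omega)
        have hpre : (s.drop inicio).take ((a + 1) - inicio)
            = (s.drop inicio).take (a - inicio) ++ [c] := by
          have : (a + 1) - inicio = a - inicio + 1 := by omega
          rw [this, pvTake_succ_of_get s inicio a c hia hlt hget]
        rw [hpre] at hrec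
        have hsegs : pvSegs ((s.drop inicio).take (a - inicio)) (c :: t)
            = pvSegs ((s.drop inicio).take (a - inicio) ++ [c]) t := by
          simp [pvSegs, hc]
        rw [hsegs]
        exact ⟨fi, ff, hrec⟩

lemma pvFirstLoop (s : List Char) :
    ∃ fi ff,
      (List.range s.length).foldl (pvStepA s) ([], 0, 0, [], 0)
        = (pvSegs [] s, fi, ff, ([] : List Char), (pvSegs [] s).length) := by
  obtain ⟨fi, ff, h⟩ := pvLoopA s s 0 0 [] (le_refl 0) (by simp) (by omega)
  refine ⟨fi, ff, ?_⟩
  rw [List.range_eq_range']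
  simpa using h

lemma pvGetDRangeMap (g : List Char → String) :
    ∀ (t : List (List Char)) (j : Nat) (big : List (List Char)), big.drop j = t →
    (List.range' j t.length).map (fun i => g (big.getD i [])) = t.map g := by
  intro t
  induction t with
  | nil => simp
  | cons x t ih =>
      intro j big hdrop
      have hlt : j < big.length := by
        have := congrArg List.length hdrop; simp at this; omega
      have hx : big[j] = x := by
        have h0 : (big.drop j)[0]'(by simp; omega) = x := by simp [hdrop]
        simpa using h0
      have hdrop' : big.drop (j + 1) = t := by
        have h2 := congrArg (List.drop 1) hdrop
        rw [List.drop_drop] at h2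
        simpa [Nat.add_comm] using h2
      have hgd : big.getD j [] = x := by
        simp [List.getD_eq_getElem?_getD, List.getElem?_eq_getElem hlt, hx]
      rw [List.length_cons, List.range'_succ, List.map_cons, ih (j + 1) big hdrop',
        List.map_cons, hgd]

lemma pvSecondLoop (segs : List (List Char)) :
    (List.range segs.length).foldl
      (fun out i =>
        if i = 0 then out ++ [String.mk (segs.getD 0 [])]
        else out ++ [String.mk (PySem.List.slice (segs.getD i []) (some 1) none)]) []
      = (match segs with
        | [] => []
        | h :: t => String.mk h :: t.map (fun seg => String.mk (PySem.List.slice seg (some 1) none))) := by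
  have hbody : ∀ (out : List String) (i : Nat),
      (if i = 0 then out ++ [String.mk (segs.getD 0 [])]
       else out ++ [String.mk (PySem.List.slice (segs.getD i []) (some 1) none)])
      = out ++ [if i = 0 then String.mk (segs.getD 0 [])
                else String.mk (PySem.List.slice (segs.getD i []) (some 1) none)] := by
    intro out i; by_cases h : i = 0 <;> simp [h]
  simp only [hbody]
  rw [PySem.List.foldl_append_singleton_eq_map]
  match segs with
  | [] => simp
  | h :: t =>
      rw [List.length_cons, List.range_eq_range', List.range'_succ, List.map_cons, if_pos rfl]
      simp only [List.nil_append, List.getD_cons_zero]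
      congr 1
      rw [← pvGetDRangeMap (fun seg => String.mk (PySem.List.slice seg (some 1) none)) t 1 (h :: t) (by simp)]
      apply List.map_congr_left
      intro i hi
      have hne : i ≠ 0 := by
        have := List.mem_range'.mp hi; omega
      simp [hne, List.getD_eq_getElem?_getD]

lemma pvSliceDropLast (xs : List (List Char)) :
    PySem.List.slice xs none (some (-1)) = xs.dropLast := by
  match xs with
  | [] => rfl
  | x :: t =>
      simp [PySem.List.slice, PySem.List.clampIdx, List.dropLast_eq_take]
      rw [if_neg (by omega)]
      omega

lemma pvSliceTakeOne (xs : List (List Char)) :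
    PySem.List.slice xs none (some 1) = xs.take 1 := by
  match xs with
  | [] => rfl
  | x :: t => simp [PySem.List.slice, PySem.List.clampIdx]

-- ===== VERDICT (by name: the statement is the Claim_ definition above) =====
theorem separar_cadeias_vetores_spec : Claim_equal_separar_cadeias_vetores := by
  intro cadeia _
  unfold Spec_separar_cadeias_vetores separar_cadeias_vetores separar_cadeias_vetores_alt
  obtain ⟨fi, ff, hA⟩ := pvFirstLoop cadeia.toList
  simp only [hA]
  rw [pvSecondLoop]
  rw [pvSplitOn_eq, pvSliceDropLast, ← pvParts_dropLast [] cadeia.toList]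
  set segs := (pvParts [] cadeia.toList).dropLast.map (fun p => p ++ [')']) with hsegs
  rw [pvSliceTakeOne, PySem.List.slice_from _ (by omega)]
  match segs with
  | [] => simp
  | h :: t => simp
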